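-- pv_equiv track=rewrite | github.com/AvatarTwi/foresight_system | prescheduler/dependency_analysis/Learning/utils.py | get_matached_domain
-- ===== SOURCE A (Python) =====
-- from typing import List, Tuple, Set
--
-- def convert_to_scope_domain(scope: List[int], condition: List[int]) -> Tuple[List[int], List[int], List[int]]:
--     """
--     将scope和condition列表按排序顺序合并
--
--     Returns:
--         scope_range: 合并后的排序列表
--         scope_loc: scope元素在合并列表中的位置
--         condition_loc: condition元素在合并列表中的位置
--     """
--     if not scope and not condition:
--         return [], [], []
--
--     # 使用堆排序思想合并两个已排序列表
--     scope_range = []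
--     scope_loc = []
--     condition_loc = []
--
--     s_idx = c_idx = 0
--
--     while s_idx < len(scope) or c_idx < len(condition):
--         # 边界检查
--         if s_idx >= len(scope):
--             scope_range.append(condition[c_idx])
--             condition_loc.append(len(scope_range) - 1)
--             c_idx += 1
--         elif c_idx >= len(condition):
--             scope_range.append(scope[s_idx])
--             scope_loc.append(len(scope_range) - 1)
--             s_idx += 1
--         else:
--             # 选择较小值
--             if scope[s_idx] <= condition[c_idx]:
--                 scope_range.append(scope[s_idx])
--                 scope_loc.append(len(scope_range) - 1)
--                 s_idx += 1
--             else: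
--                 scope_range.append(condition[c_idx])
--                 condition_loc.append(len(scope_range) - 1)
--                 c_idx += 1
--
--     return scope_range, scope_loc, condition_loc
--
-- def get_matached_domain(idx: List[bool], scope: List[int], condition: List[int]) -> Tuple[List[int], List[int], List[int], List[int], List[int]]:
--     """
--     优化后的域匹配函数
--
--     Args:
--         idx: 布尔索引列表，表示是否选中
--         scope: 作用域列表
--         condition: 条件列表
--
--     Returns:
--         scope_idx: 选中的scope位置
--         rm_scope: 要移除的scope索引
--         new_scope: 保留的scope索引
--         condition_idx: 选中的condition位置
--         new_condition: 保留的condition索引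
--     """
--     expected_length = len(scope) + len(condition)
--     if len(idx) != expected_length:
--         raise ValueError(f"索引长度不匹配: 期望{expected_length}, 实际{len(idx)}")
--
--     scope_range, scope_loc, condition_loc = convert_to_scope_domain(scope, condition)
--
--     # 使用集合优化查找性能
--     scope_loc_set = set(scope_loc)
--     condition_loc_set = set(condition_loc)
--
--     # 预分配列表容量以提高性能
--     scope_idx = []
--     rm_scope = []
--     new_scope = []
--     condition_idx = []
--     new_condition = []
--
--     # 构建映射以减少查找时间
--     scope_loc_to_index = {loc: i for i, loc in enumerate(scope_loc)}
--     condition_loc_to_index = {loc: i for i, loc in enumerate(condition_loc)}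
--
--     for i, is_selected in enumerate(idx):
--         if is_selected:
--             if i in scope_loc_set:
--                 scope_idx.append(i)
--                 rm_scope.append(scope_loc_to_index[i])
--             elif i in condition_loc_set:
--                 condition_idx.append(i)
--         else:
--             if i in scope_loc_set:
--                 new_scope.append(scope_loc_to_index[i])
--             elif i in condition_loc_set:
--                 new_condition.append(condition_loc_to_index[i])
--
--     return scope_idx, rm_scope, new_scope, condition_idx, new_condition
-- ===== SOURCE B (Python) =====
-- def get_matached_domain(idx, scope, condition):
--     # Fused single pass: merge scope/condition by two pointers and classify
--     # each merged position by idx on the fly (no intermediate lists/sets/dicts).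
--     if len(idx) != len(scope) + len(condition):
--         raise ValueError(f"索引长度不匹配: 期望{len(scope) + len(condition)}, 实际{len(idx)}")
--     s = c = 0
--     scope_idx, rm_scope, new_scope, condition_idx, new_condition = [], [], [], [], []
--     for p, selected in enumerate(idx):
--         if c >= len(condition) or (s < len(scope) and scope[s] <= condition[c]):
--             if selected:
--                 scope_idx.append(p)
--                 rm_scope.append(s)
--             else:
--                 new_scope.append(s)
--             s += 1
--         else:
--             if selected:
--                 condition_idx.append(p)
--             else:
--                 new_condition.append(c)
--             c += 1
--     return scope_idx, rm_scope, new_scope, condition_idx, new_condition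
-- ===== Notes on version B (the rewrite author's own statement) =====
-- stated objective: simpler
-- what changed: B fuses A's separate merge pass (convert_to_scope_domain) and classification pass into one two-pointer loop over idx, routing each merged element directly, so no intermediate scope_range/scope_loc lists, sets or lookup dicts are built.
import Mathlib
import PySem

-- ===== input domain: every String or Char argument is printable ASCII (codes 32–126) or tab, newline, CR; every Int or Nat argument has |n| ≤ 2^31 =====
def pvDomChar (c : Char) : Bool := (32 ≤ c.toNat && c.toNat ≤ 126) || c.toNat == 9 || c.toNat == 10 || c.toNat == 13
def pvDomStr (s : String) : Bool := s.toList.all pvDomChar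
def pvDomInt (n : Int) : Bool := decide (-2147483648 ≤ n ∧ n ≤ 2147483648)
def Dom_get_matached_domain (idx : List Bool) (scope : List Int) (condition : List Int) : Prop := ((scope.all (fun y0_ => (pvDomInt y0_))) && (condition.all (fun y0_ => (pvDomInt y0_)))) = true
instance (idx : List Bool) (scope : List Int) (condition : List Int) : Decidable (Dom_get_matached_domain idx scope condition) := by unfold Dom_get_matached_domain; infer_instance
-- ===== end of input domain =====

-- B fuses the merge of scope/condition with the classification into one two-pointer pass
-- (no intermediate scope_range/scope_loc lists, sets or dicts); objective: simpler.

-- ===== PORT A =====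
-- the while-loop of convert_to_scope_domain, step for step (s_idx, c_idx, the three lists)
def convertLoop (scope condition : List Int) (s c : Nat) (sr sl cl : List Int) :
    List Int × List Int × List Int :=
  if s < scope.length ∨ c < condition.length then
    if scope.length ≤ s then
      convertLoop scope condition s (c+1) (sr ++ [condition.getD c 0]) sl (cl ++ [(sr.length : Int)])
    else if condition.length ≤ c then
      convertLoop scope condition (s+1) c (sr ++ [scope.getD s 0]) (sl ++ [(sr.length : Int)]) cl
    else if scope.getD s 0 ≤ condition.getD c 0 then
      convertLoop scope condition (s+1) c (sr ++ [scope.getD s 0]) (sl ++ [(sr.length : Int)]) cl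
    else
      convertLoop scope condition s (c+1) (sr ++ [condition.getD c 0]) sl (cl ++ [(sr.length : Int)])
  else (sr, sl, cl)
termination_by (scope.length - s) + (condition.length - c)
decreasing_by all_goals omega

def convert_to_scope_domain (scope condition : List Int) : List Int × List Int × List Int :=
  if scope = [] ∧ condition = [] then ([], [], [])
  else convertLoop scope condition 0 0 [] [] []

-- {loc: i for i, loc in enumerate(l)}
def dictOfEnum (l : List Int) : PySem.Dict Int Int :=
  (PySem.List.enumerate l).foldl (fun d p => d.insert p.2 p.1) PySem.Dict.empty

-- the body of A's 'for i, is_selected in enumerate(idx)' loop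
def aStep (slocSet clocSet : PySem.Set Int) (sMap cMap : PySem.Dict Int Int)
    (acc : List Int × List Int × List Int × List Int × List Int) (p : Int × Bool) :
    List Int × List Int × List Int × List Int × List Int :=
  if p.2 then
    if PySem.Set.contains slocSet p.1 then
      (acc.1 ++ [p.1], acc.2.1 ++ [sMap.getD p.1 0], acc.2.2.1, acc.2.2.2.1, acc.2.2.2.2)
    else if PySem.Set.contains clocSet p.1 then
      (acc.1, acc.2.1, acc.2.2.1, acc.2.2.2.1 ++ [p.1], acc.2.2.2.2)
    else acc
  else
    if PySem.Set.contains slocSet p.1 then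
      (acc.1, acc.2.1, acc.2.2.1 ++ [sMap.getD p.1 0], acc.2.2.2.1, acc.2.2.2.2)
    else if PySem.Set.contains clocSet p.1 then
      (acc.1, acc.2.1, acc.2.2.1, acc.2.2.2.1, acc.2.2.2.2 ++ [cMap.getD p.1 0])
    else acc

-- the Python length check raises ValueError on mismatch (excluded by Pre_); the port just
-- proceeds.  The dict lookups scope_loc_to_index[i]/condition_loc_to_index[i] are guarded
-- by the set-membership tests, so getD with default 0 is exact where Python returns.
def get_matached_domain (idx : List Bool) (scope : List Int) (condition : List Int) :
    List Int × List Int × List Int × List Int × List Int :=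
  let r := convert_to_scope_domain scope condition
  let sl := r.2.1
  let cl := r.2.2
  (PySem.List.enumerate idx).foldl
    (aStep (PySem.Set.ofList sl) (PySem.Set.ofList cl) (dictOfEnum sl) (dictOfEnum cl))
    ([], [], [], [], [])

-- ===== PORT B =====
-- the body of B's fused loop: two pointers (s, c) plus the five output lists
def bStep (scope condition : List Int)
    (st : (Nat × Nat) × (List Int × List Int × List Int × List Int × List Int))
    (p : Int × Bool) :
    (Nat × Nat) × (List Int × List Int × List Int × List Int × List Int) :=
  let s := st.1.1
  let c := st.1.2
  let acc := st.2
  if condition.length ≤ c ∨ (s < scope.length ∧ scope.getD s 0 ≤ condition.getD c 0) then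
    if p.2 then
      ((s+1, c), (acc.1 ++ [p.1], acc.2.1 ++ [(s : Int)], acc.2.2.1, acc.2.2.2.1, acc.2.2.2.2))
    else
      ((s+1, c), (acc.1, acc.2.1, acc.2.2.1 ++ [(s : Int)], acc.2.2.2.1, acc.2.2.2.2))
  else
    if p.2 then
      ((s, c+1), (acc.1, acc.2.1, acc.2.2.1, acc.2.2.2.1 ++ [p.1], acc.2.2.2.2))
    else
      ((s, c+1), (acc.1, acc.2.1, acc.2.2.1, acc.2.2.2.1, acc.2.2.2.2 ++ [(c : Int)]))

-- single fused two-pointer pass; the length check raises ValueError in Python (outside Pre_)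
def get_matached_domain_alt (idx : List Bool) (scope : List Int) (condition : List Int) :
    List Int × List Int × List Int × List Int × List Int :=
  ((PySem.List.enumerate idx).foldl (bStep scope condition) ((0, 0), ([], [], [], [], []))).2

-- ===== PRECONDITION & SPEC =====
-- Pre_ excludes exactly the inputs on which A raises ValueError (the length mismatch)
def Pre_get_matached_domain (idx : List Bool) (scope : List Int) (condition : List Int) : Prop :=
  idx.length = scope.length + condition.length
instance (idx : List Bool) (scope : List Int) (condition : List Int) : Decidable (Pre_get_matached_domain idx scope condition) := by unfold Pre_get_matached_domain; infer_instance

def pvWitness_get_matached_domain : List Bool × List Int × List Int :=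
  ([true, false, true], [1, 4], [2])

def Spec_get_matached_domain (idx : List Bool) (scope : List Int) (condition : List Int) (out : List Int × List Int × List Int × List Int × List Int) : Prop := out = get_matached_domain_alt idx scope condition
instance (idx : List Bool) (scope : List Int) (condition : List Int) (out : List Int × List Int × List Int × List Int × List Int) : Decidable (Spec_get_matached_domain idx scope condition out) := by unfold Spec_get_matached_domain; infer_instance

-- ===== CLAIM (what is proved, stated in full; the proofs are below) =====
def Claim_equal_get_matached_domain : Prop := ∀ (idx : List Bool) (scope : List Int) (condition : List Int), Dom_get_matached_domain idx scope condition → Pre_get_matached_domain idx scope condition → Spec_get_matached_domain idx scope condition (get_matached_domain idx scope condition)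

-- ===== LEMMAS AND PROOFS =====

-- the sequence of merge decisions of A's while-loop (true = the element came from scope)
def tags (scope condition : List Int) (s c : Nat) : List Bool :=
  if s < scope.length ∨ c < condition.length then
    if scope.length ≤ s then false :: tags scope condition s (c+1)
    else if condition.length ≤ c then true :: tags scope condition (s+1) c
    else if scope.getD s 0 ≤ condition.getD c 0 then true :: tags scope condition (s+1) c
    else false :: tags scope condition s (c+1)
  else []
termination_by (scope.length - s) + (condition.length - c)
decreasing_by all_goals omega

-- positions (from offset p) carrying tag b
def posOf (t : List Bool) (b : Bool) (p : Nat) : List Int :=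
  match t with
  | [] => []
  | x :: xs => if x = b then (p : Int) :: posOf xs b (p+1) else posOf xs b (p+1)

theorem tags_length (scope condition : List Int) (s c : Nat)
    (hs : s ≤ scope.length) (hc : c ≤ condition.length) :
    (tags scope condition s c).length = (scope.length - s) + (condition.length - c) := by
  fun_induction tags scope condition s c <;> simp_all <;> omega

theorem tags_step (scope condition : List Int) (s c : Nat)
    (h : s < scope.length ∨ c < condition.length) :
    tags scope condition s c =
      if condition.length ≤ c ∨ (s < scope.length ∧ scope.getD s 0 ≤ condition.getD c 0) then
        true :: tags scope condition (s+1) c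
      else false :: tags scope condition s (c+1) := by
  rw [tags, if_pos h]
  split_ifs <;> simp_all <;> omega

theorem convertLoop_snd (scope condition : List Int) (s c : Nat) (sr sl cl : List Int) :
    (convertLoop scope condition s c sr sl cl).2 =
      (sl ++ posOf (tags scope condition s c) true sr.length,
       cl ++ posOf (tags scope condition s c) false sr.length) := by
  fun_induction convertLoop scope condition s c sr sl cl <;>
    (rw [tags]; split_ifs <;> simp_all [posOf])

theorem posOf_ge (t : List Bool) (b : Bool) :
    ∀ (p : Nat) (q : Int), q ∈ posOf t b p → (p : Int) ≤ q := by
  induction t with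
  | nil => simp [posOf]
  | cons x xs ih =>
    intro p q hq
    simp only [posOf] at hq
    split at hq
    · rcases List.mem_cons.mp hq with h | h
      · omega
      · have := ih (p+1) q h; push_cast at this ⊢; omega
    · have := ih (p+1) q hq; push_cast at this ⊢; omega

theorem mem_posOf (t : List Bool) (b : Bool) :
    ∀ (p i : Nat), ((i : Int) ∈ posOf t b p) ↔ (p ≤ i ∧ i - p < t.length ∧ t.getD (i - p) (!b) = b) := by
  induction t with
  | nil => simp [posOf]
  | cons x xs ih =>
    intro p i
    simp only [posOf]
    constructor
    · intro h
      split at h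
      · rcases List.mem_cons.mp h with h | h
        · have : p = i := by exact_mod_cast h.symm
          subst this; simp_all
        · have h1 := (ih (p+1) i).mp h
          have h2 : i - p = (i - (p+1)) + 1 := by omega
          refine ⟨by omega, by simp; omega, ?_⟩
          rw [h2]; simpa using h1.2.2
      · have h1 := (ih (p+1) i).mp h
        have h2 : i - p = (i - (p+1)) + 1 := by omega
        refine ⟨by omega, by simp; omega, ?_⟩
        rw [h2]; simpa using h1.2.2
    · rintro ⟨h1, h2, h3⟩
      by_cases hip : i = p
      · subst hip
        simp at h3 h2
        simp [h3]
      · have h2' : i - p = (i - (p+1)) + 1 := by omega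
        rw [h2'] at h3
        simp at h3 h2
        have : (i:Int) ∈ posOf xs b (p+1) := (ih (p+1) i).mpr ⟨by omega, by omega, h3⟩
        split
        · exact List.mem_cons_of_mem _ this
        · exact this

theorem nodup_posOf (t : List Bool) (b : Bool) : ∀ p, (posOf t b p).Nodup := by
  induction t with
  | nil => simp [posOf]
  | cons x xs ih =>
    intro p
    simp only [posOf]
    split
    · refine List.nodup_cons.mpr ⟨fun hmem => ?_, ih (p+1)⟩
      have := posOf_ge xs b (p+1) _ hmem
      push_cast at this; omega
    · exact ih (p+1)

theorem idxOf_posOf (t : List Bool) (b : Bool) :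
    ∀ (p i : Nat), p ≤ i → i - p < t.length → t.getD (i - p) (!b) = b →
      (posOf t b p).idxOf (i : Int) = (t.take (i - p)).count b := by
  induction t with
  | nil => simp
  | cons x xs ih =>
    intro p i h1 h2 h3
    simp only [posOf]
    by_cases hip : i = p
    · subst hip
      simp at h3
      simp [h3, List.idxOf_cons_self]
    · have h2' : i - p = (i - (p+1)) + 1 := by omega
      rw [h2'] at h3 h2 ⊢
      simp at h3 h2
      have ihh := ih (p+1) i (by omega) (by omega) h3
      by_cases hx : x = b
      · subst hx
        have hne : ((p:Int) == (i:Int)) = false := by simp; omega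
        simp [List.take_succ_cons, List.idxOf_cons, hne, ihh]
      · simp [hx, List.take_succ_cons, ihh]

theorem dictOfEnum_getD_aux (x : Int) :
    ∀ (l : List Int) (s : Int) (d : PySem.Dict Int Int), x ∉ l →
      ((PySem.List.enumerate l s).foldl (fun d p => d.insert p.2 p.1) d).getD x 0 = d.getD x 0 := by
  intro l
  induction l with
  | nil => simp [PySem.List.enumerate]
  | cons y ys ih =>
    intro s d hx
    rw [PySem.List.enumerate_cons]
    simp only [List.foldl_cons]
    rw [ih (s+1) _ (by simp_all)]
    rw [PySem.Dict.getD_insert]; simp_all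

theorem dictOfEnum_getD (x : Int) :
    ∀ (l : List Int) (s : Int) (d : PySem.Dict Int Int), x ∈ l → l.Nodup →
      ((PySem.List.enumerate l s).foldl (fun d p => d.insert p.2 p.1) d).getD x 0 = s + (l.idxOf x : Int) := by
  intro l
  induction l with
  | nil => simp
  | cons y ys ih =>
    intro s d hx hnd
    rw [PySem.List.enumerate_cons]
    simp only [List.foldl_cons]
    by_cases hxy : x = y
    · subst hxy
      rw [dictOfEnum_getD_aux x ys (s+1) _ (by simp_all)]
      rw [PySem.Dict.getD_insert_self]
      simp [List.idxOf_cons_self]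
    · rw [ih (s+1) _ (by simp_all) (by simp_all)]
      have : ((y:Int) == x) = false := by simp [Ne.symm hxy]
      simp [List.idxOf_cons, this]
      ring

-- the two loops agree step by step
theorem loops_agree (scope condition : List Int) (t : List Bool)
    (_ht : t = tags scope condition 0 0) :
    ∀ (rest : List Bool) (i s c : Nat)
      (acc : List Int × List Int × List Int × List Int × List Int),
      i + rest.length = t.length →
      s = ((t.take i).count true) →
      c = ((t.take i).count false) →
      tags scope condition s c = t.drop i →
      s ≤ scope.length → c ≤ condition.length →
      (PySem.List.enumerate rest (i : Int)).foldl
          (aStep (PySem.Set.ofList (posOf t true 0)) (PySem.Set.ofList (posOf t false 0))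
                 (dictOfEnum (posOf t true 0)) (dictOfEnum (posOf t false 0))) acc
        = ((PySem.List.enumerate rest (i : Int)).foldl (bStep scope condition) ((s, c), acc)).2 := by
  intro rest
  induction rest with
  | nil => intro i s c acc _ _ _ _ _ _; simp [PySem.List.enumerate]
  | cons b0 rest ih =>
    intro i s c acc hlen hs hc htags hsb hcb
    have hin : i < t.length := by simp at hlen; omega
    have hdrop : t.drop i = t[i] :: t.drop (i+1) := List.drop_eq_getElem_cons hin
    have hne : tags scope condition s c ≠ [] := by
      rw [htags]
      simp only [ne_eq, List.drop_eq_nil_iff]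
      omega
    have hsc : s < scope.length ∨ c < condition.length := by
      by_contra hcon
      push Not at hcon
      rw [tags, if_neg (by omega)] at hne
      exact hne rfl
    have hstep := tags_step scope condition s c hsc
    rw [htags, hdrop] at hstep
    have hmemT : ∀ b : Bool, t[i] = b → (i : Int) ∈ posOf t b 0 := by
      intro b hb
      exact (mem_posOf t b 0 i).mpr ⟨Nat.zero_le _, by simpa using hin,
        by rw [List.getD_eq_getElem _ _ (by simpa using hin)]; simpa using hb⟩
    have hnmemT : ∀ b : Bool, t[i] = b → (i : Int) ∉ posOf t (!b) 0 := by
      intro b hb hmem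
      have := ((mem_posOf t (!b) 0 i).mp hmem).2.2
      rw [List.getD_eq_getElem _ _ (by simpa using hin)] at this
      simp only [Nat.sub_zero] at this
      rw [hb] at this
      cases b <;> simp at this
    have hdict : ∀ b : Bool, t[i] = b →
        (dictOfEnum (posOf t b 0)).getD (i : Int) 0 = (((t.take i).count b : Nat) : Int) := by
      intro b hb
      unfold dictOfEnum
      rw [dictOfEnum_getD (i : Int) (posOf t b 0) 0 _ (hmemT b hb) (nodup_posOf t b 0)]
      rw [idxOf_posOf t b 0 i (Nat.zero_le _) (by simpa using hin)
        (by rw [List.getD_eq_getElem _ _ (by simpa using hin)]; simpa using hb)]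
      simp
    have hcontains : ∀ b : Bool, t[i] = b →
        PySem.Set.contains (PySem.Set.ofList (posOf t b 0)) (i : Int) = true ∧
        PySem.Set.contains (PySem.Set.ofList (posOf t (!b) 0)) (i : Int) = false := by
      intro b hb
      constructor
      · exact (PySem.Set.contains_iff _ _).mpr ((PySem.Set.mem_ofList _ _).mpr (hmemT b hb))
      · rw [← Bool.not_eq_true]
        intro hcon
        exact hnmemT b hb ((PySem.Set.mem_ofList _ _).mp ((PySem.Set.contains_iff _ _).mp hcon))
    have htake : t.take (i+1) = t.take i ++ [t[i]] := by
      rw [List.take_add_one]; simp [List.getElem?_eq_getElem hin]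
    rw [PySem.List.enumerate_cons]
    simp only [List.foldl_cons]
    by_cases hB : condition.length ≤ c ∨ (s < scope.length ∧ scope.getD s 0 ≤ condition.getD c 0)
    · rw [if_pos hB] at hstep
      have hti : t[i] = true := (List.cons.injEq _ _ _ _ ▸ hstep).1
      have htags' : tags scope condition (s+1) c = t.drop (i+1) :=
        ((List.cons.injEq _ _ _ _ ▸ hstep).2).symm
      have hslt : s < scope.length := by
        rcases hB with hB | hB
        · rcases hsc with h | h
          · exact h
          · omega
        · exact hB.1
      have hA := hcontains true hti
      have hD := hdict true hti
      have hstepA : aStep (PySem.Set.ofList (posOf t true 0)) (PySem.Set.ofList (posOf t false 0))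
          (dictOfEnum (posOf t true 0)) (dictOfEnum (posOf t false 0)) acc ((i : Int), b0)
          = if b0 then (acc.1 ++ [(i:Int)], acc.2.1 ++ [(s:Int)], acc.2.2.1, acc.2.2.2.1, acc.2.2.2.2)
            else (acc.1, acc.2.1, acc.2.2.1 ++ [(s:Int)], acc.2.2.2.1, acc.2.2.2.2) := by
        simp only [aStep]
        have hm := hmemT true hti
        have hn := hnmemT true hti
        simp only [Bool.not_true] at hn
        cases b0 <;> simp [hm, hD, hs]
      have hstepB : bStep scope condition ((s, c), acc) ((i : Int), b0)
          = if b0 then ((s+1, c), (acc.1 ++ [(i:Int)], acc.2.1 ++ [(s:Int)], acc.2.2.1, acc.2.2.2.1, acc.2.2.2.2))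
            else ((s+1, c), (acc.1, acc.2.1, acc.2.2.1 ++ [(s:Int)], acc.2.2.2.1, acc.2.2.2.2)) := by
        simp only [bStep]
        rw [if_pos hB]
      rw [hstepA, hstepB]
      have hpush : ((i : Int) + 1) = ((i + 1 : Nat) : Int) := by push_cast; ring
      cases b0 <;>
        · simp only [Bool.false_eq_true, ite_false, ite_true]
          rw [hpush]
          exact ih (i+1) (s+1) c _ (by simp at hlen ⊢; omega)
            (by rw [htake]; simp [hti, hs]) (by rw [htake]; simp [hti, hc])
            htags' (by omega) hcb
    · rw [if_neg hB] at hstep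
      have hti : t[i] = false := (List.cons.injEq _ _ _ _ ▸ hstep).1
      have htags' : tags scope condition s (c+1) = t.drop (i+1) :=
        ((List.cons.injEq _ _ _ _ ▸ hstep).2).symm
      have hclt : c < condition.length := by omega
      have hA := hcontains false hti
      have hD := hdict false hti
      have hstepA : aStep (PySem.Set.ofList (posOf t true 0)) (PySem.Set.ofList (posOf t false 0))
          (dictOfEnum (posOf t true 0)) (dictOfEnum (posOf t false 0)) acc ((i : Int), b0)
          = if b0 then (acc.1, acc.2.1, acc.2.2.1, acc.2.2.2.1 ++ [(i:Int)], acc.2.2.2.2)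
            else (acc.1, acc.2.1, acc.2.2.1, acc.2.2.2.1, acc.2.2.2.2 ++ [(c:Int)]) := by
        simp only [aStep]
        have hm := hmemT false hti
        have hn := hnmemT false hti
        simp only [Bool.not_false] at hn
        cases b0 <;> simp [hm, hn, hD, hc]
      have hstepB : bStep scope condition ((s, c), acc) ((i : Int), b0)
          = if b0 then ((s, c+1), (acc.1, acc.2.1, acc.2.2.1, acc.2.2.2.1 ++ [(i:Int)], acc.2.2.2.2))
            else ((s, c+1), (acc.1, acc.2.1, acc.2.2.1, acc.2.2.2.1, acc.2.2.2.2 ++ [(c:Int)])) := by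
        simp only [bStep]
        rw [if_neg hB]
      rw [hstepA, hstepB]
      have hpush : ((i : Int) + 1) = ((i + 1 : Nat) : Int) := by push_cast; ring
      cases b0 <;>
        · simp only [Bool.false_eq_true, ite_false, ite_true]
          rw [hpush]
          exact ih (i+1) s (c+1) _ (by simp at hlen ⊢; omega)
            (by rw [htake]; simp [hti, hs]) (by rw [htake]; simp [hti, hc])
            htags' hsb (by omega)
    
theorem convert_snd_eq (scope condition : List Int) :
    (convert_to_scope_domain scope condition).2 =
      (posOf (tags scope condition 0 0) true 0, posOf (tags scope condition 0 0) false 0) := by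
  unfold convert_to_scope_domain
  split_ifs with h
  · obtain ⟨h1, h2⟩ := h
    subst h1; subst h2
    rw [tags]
    simp [posOf]
  · simpa using convertLoop_snd scope condition 0 0 [] [] []

-- ===== VERDICT (by name: the statement is the Claim_ definition above) =====
theorem get_matached_domain_spec : Claim_equal_get_matached_domain := by
  intro idx scope condition _ hpre
  unfold Spec_get_matached_domain
  unfold get_matached_domain get_matached_domain_alt
  have hsnd := convert_snd_eq scope condition
  set t := tags scope condition 0 0 with ht
  have hfst : (convert_to_scope_domain scope condition).2.1 = posOf t true 0 := by rw [hsnd]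
  have hsnd2 : (convert_to_scope_domain scope condition).2.2 = posOf t false 0 := by rw [hsnd]
  simp only [hfst, hsnd2]
  have htl : t.length = scope.length + condition.length := by
    rw [ht]; simpa using tags_length scope condition 0 0 (Nat.zero_le _) (Nat.zero_le _)
  exact loops_agree scope condition t ht idx 0 0 0 ([], [], [], [], [])
    (by simpa [htl] using hpre) (by simp) (by simp) (by simpa using ht.symm) (Nat.zero_le _) (Nat.zero_le _)
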